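-- pv_equiv track=rewrite | github.com/ChaoHuang-CH/relation-network | train.py | concatenate_datasets
-- ===== SOURCE A (Python) =====
-- def concatenate_datasets(datasets):
--     q, a, c, l, c_real_len, q_real_len = [], [], [], [], [], []
--     for dataset in datasets:
--         q += dataset[0]
--         a += dataset[1]
--         c += dataset[2]
--         l += dataset[3]
--         c_real_len += dataset[4]
--         q_real_len += dataset[5]
--     return q, a, c, l, c_real_len, q_real_len
-- ===== SOURCE B (Python) =====
-- def concatenate_datasets(datasets):
--     # Divide and conquer: split the dataset list in half, concatenate each
--     # half recursively, then merge the two six-tuples componentwise.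
--     n = len(datasets)
--     if n == 0:
--         return [], [], [], [], [], []
--     if n == 1:
--         d = datasets[0]
--         return list(d[0]), list(d[1]), list(d[2]), list(d[3]), list(d[4]), list(d[5])
--     mid = n // 2
--     left = concatenate_datasets(datasets[:mid])
--     right = concatenate_datasets(datasets[mid:])
--     return tuple(x + y for x, y in zip(left, right))
-- ===== Notes on version B (the rewrite author's own statement) =====
-- stated objective: alternative
-- what changed: Replaced A's single dataset-outer accumulator loop with a divide-and-conquer recursion: split the dataset list in half, concatenate each half recursively, and merge the two six-tuples componentwise.
import Mathlib
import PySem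

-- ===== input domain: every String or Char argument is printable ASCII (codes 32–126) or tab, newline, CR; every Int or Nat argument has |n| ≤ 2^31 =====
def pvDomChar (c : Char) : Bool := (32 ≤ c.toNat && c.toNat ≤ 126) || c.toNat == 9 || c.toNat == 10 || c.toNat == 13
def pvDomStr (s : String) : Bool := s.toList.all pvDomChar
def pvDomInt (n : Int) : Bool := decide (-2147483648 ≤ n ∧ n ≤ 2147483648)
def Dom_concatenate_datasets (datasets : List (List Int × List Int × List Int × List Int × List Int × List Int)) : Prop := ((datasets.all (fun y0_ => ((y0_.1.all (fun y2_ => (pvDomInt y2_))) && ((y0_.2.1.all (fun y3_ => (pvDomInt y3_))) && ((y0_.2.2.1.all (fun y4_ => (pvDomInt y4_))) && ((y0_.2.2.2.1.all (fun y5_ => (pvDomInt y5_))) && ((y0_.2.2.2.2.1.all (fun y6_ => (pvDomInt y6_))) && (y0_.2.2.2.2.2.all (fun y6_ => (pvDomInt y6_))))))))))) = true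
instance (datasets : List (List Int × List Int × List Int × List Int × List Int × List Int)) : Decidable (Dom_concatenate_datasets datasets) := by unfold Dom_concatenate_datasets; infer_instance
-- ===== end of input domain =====

-- B replaces A's dataset-outer accumulator loop by a divide-and-conquer recursion (split, recurse, merge componentwise); alternative decomposition, same results.


-- ===== PORT A =====
-- dataset-outer loop, six accumulators extended in each step
def concatenate_datasets (datasets : List (List Int × List Int × List Int × List Int × List Int × List Int)) : List Int × List Int × List Int × List Int × List Int × List Int :=
  datasets.foldl
    (fun st d =>
      (st.1 ++ d.1, st.2.1 ++ d.2.1, st.2.2.1 ++ d.2.2.1, st.2.2.2.1 ++ d.2.2.2.1,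
       st.2.2.2.2.1 ++ d.2.2.2.2.1, st.2.2.2.2.2 ++ d.2.2.2.2.2))
    ([], [], [], [], [], [])

-- ===== PORT B =====
-- componentwise merge of two six-tuples (the `tuple(x + y for x, y in zip(...))` step)
def pvMerge6 (x y : List Int × List Int × List Int × List Int × List Int × List Int) : List Int × List Int × List Int × List Int × List Int × List Int :=
  (x.1 ++ y.1, x.2.1 ++ y.2.1, x.2.2.1 ++ y.2.2.1, x.2.2.2.1 ++ y.2.2.2.1,
   x.2.2.2.2.1 ++ y.2.2.2.2.1, x.2.2.2.2.2 ++ y.2.2.2.2.2)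

-- divide and conquer: split in half, recurse on the halves, merge componentwise
def concatenate_datasets_alt (datasets : List (List Int × List Int × List Int × List Int × List Int × List Int)) : List Int × List Int × List Int × List Int × List Int × List Int :=
  match datasets with
  | [] => ([], [], [], [], [], [])
  | [d] => (d.1, d.2.1, d.2.2.1, d.2.2.2.1, d.2.2.2.2.1, d.2.2.2.2.2)
  | d₁ :: d₂ :: rest =>
    let ds := d₁ :: d₂ :: rest
    let mid := ds.length / 2
    pvMerge6 (concatenate_datasets_alt (ds.take mid)) (concatenate_datasets_alt (ds.drop mid))
termination_by datasets.length
decreasing_by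
  · simp; omega
  · simp; omega

-- ===== PRECONDITION & SPEC =====
def Spec_concatenate_datasets (datasets : List (List Int × List Int × List Int × List Int × List Int × List Int)) (out : List Int × List Int × List Int × List Int × List Int × List Int) : Prop := out = concatenate_datasets_alt datasets
instance (datasets : List (List Int × List Int × List Int × List Int × List Int × List Int)) (out : List Int × List Int × List Int × List Int × List Int × List Int) : Decidable (Spec_concatenate_datasets datasets out) := by unfold Spec_concatenate_datasets; infer_instance

-- ===== CLAIM =====
def Claim_equal_concatenate_datasets : Prop := ∀ (datasets : List (List Int × List Int × List Int × List Int × List Int × List Int)), Dom_concatenate_datasets datasets → Spec_concatenate_datasets datasets (concatenate_datasets datasets)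

-- ===== LEMMAS AND PROOFS =====
-- characterisation of A's fold: it appends the componentwise flattening to the accumulator
theorem concatenate_foldl_general (datasets : List (List Int × List Int × List Int × List Int × List Int × List Int)) (st : List Int × List Int × List Int × List Int × List Int × List Int) :
    datasets.foldl
      (fun st d =>
        (st.1 ++ d.1, st.2.1 ++ d.2.1, st.2.2.1 ++ d.2.2.1, st.2.2.2.1 ++ d.2.2.2.1,
         st.2.2.2.2.1 ++ d.2.2.2.2.1, st.2.2.2.2.2 ++ d.2.2.2.2.2)) st
    = (st.1 ++ datasets.flatMap (·.1), st.2.1 ++ datasets.flatMap (·.2.1),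
       st.2.2.1 ++ datasets.flatMap (·.2.2.1), st.2.2.2.1 ++ datasets.flatMap (·.2.2.2.1),
       st.2.2.2.2.1 ++ datasets.flatMap (·.2.2.2.2.1), st.2.2.2.2.2 ++ datasets.flatMap (·.2.2.2.2.2)) := by
  induction datasets generalizing st with
  | nil => simp
  | cons d tl ih => simp [List.foldl, ih]

-- characterisation of B's divide-and-conquer: it computes the componentwise flattening
theorem alt_eq_flatMap (datasets : List (List Int × List Int × List Int × List Int × List Int × List Int)) :
    concatenate_datasets_alt datasets
    = (datasets.flatMap (·.1), datasets.flatMap (·.2.1), datasets.flatMap (·.2.2.1),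
       datasets.flatMap (·.2.2.2.1), datasets.flatMap (·.2.2.2.2.1), datasets.flatMap (·.2.2.2.2.2)) := by
  fun_induction concatenate_datasets_alt datasets with
  | case1 => simp
  | case2 d => simp
  | case3 d₁ d₂ rest ds mid ihl ihr =>
    simp only [pvMerge6, ihl, ihr, ds, mid]
    have h : List.take ((rest.length + 1 + 1) / 2) (d₁ :: d₂ :: rest) ++
        List.drop ((rest.length + 1 + 1) / 2) (d₁ :: d₂ :: rest) = d₁ :: d₂ :: rest :=
      List.take_append_drop _ _
    simp [← List.flatMap_append, h]

-- ===== VERDICT =====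
theorem concatenate_datasets_spec : Claim_equal_concatenate_datasets := by
  intro datasets _
  unfold Spec_concatenate_datasets concatenate_datasets
  rw [concatenate_foldl_general, alt_eq_flatMap]
  simp
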